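-- pv_equiv track=rewrite | github.com/gcrtnst/sw-luadocs-helper | src/sw_luadocs/extract.py | generate_repack_line_patterns
-- ===== SOURCE A (Python) =====
-- def generate_repack_elem_patterns(ocr_txt_list, *, sep="\n\n"):
--     ocr_txt_list = list(map(str, ocr_txt_list))
--     sep = str(sep)
--
--     if len(ocr_txt_list) <= 0:
--         return []
--
--     pak_txt_tuple_set = set()
--     for pattern in range(1 << (len(ocr_txt_list) - 1)):
--         pak_txt_list = []
--         start_idx = 0
--         for idx in range(1, len(ocr_txt_list)):
--             if pattern & (1 << (idx - 1)) == 0: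
--                 pak_txt = sep.join(ocr_txt_list[start_idx:idx])
--                 pak_txt_list.append(pak_txt)
--                 start_idx = idx
--         pak_txt = sep.join(ocr_txt_list[start_idx:])
--         pak_txt_list.append(pak_txt)
--
--         pak_txt_tuple = tuple(pak_txt_list)
--         pak_txt_tuple_set.add(pak_txt_tuple)
--
--     pak_txt_list_list = sorted(map(list, pak_txt_tuple_set))
--     return pak_txt_list_list
--
-- def generate_repack_line_patterns(ocr_txt_full):
--     ocr_txt_full = str(ocr_txt_full)
--     sep = "\n"
--
--     ocr_txt_list = ocr_txt_full.split(sep=sep)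
--     old_txt_list_list = generate_repack_elem_patterns(ocr_txt_list, sep=sep)
--
--     new_txt_list_list = []
--     for old_txt_list in old_txt_list_list:
--         for old_txt in old_txt_list:
--             if old_txt.replace(sep, "") == "":
--                 break
--         else:
--             new_txt_list_list.append(old_txt_list)
--     return new_txt_list_list
-- ===== SOURCE B (Python) =====
-- def generate_repack_line_patterns(ocr_txt_full):
--     sep = "\n"
--     lines = str(ocr_txt_full).split(sep)
--
--     def parts(ls):
--         # all consecutive partitions of ls, built by recursing on the last line:
--         # either it forms its own group, or it is merged into the last group.
--         if len(ls) <= 1: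
--             return [ls[:]]
--         rest = parts(ls[:-1])
--         split_off = [p + [ls[-1]] for p in rest]
--         merged = [p[:-1] + [sep.join([p[-1], ls[-1]])] for p in rest]
--         return split_off + merged
--
--     return [p for p in sorted(parts(lines))
--             if all(g.replace(sep, "") != "" for g in p)]
-- ===== Notes on version B (the rewrite author's own statement) =====
-- stated objective: alternative
-- what changed: Replaces the bitmask enumeration (iterate 2^(n-1) patterns, rebuild groups by scanning bits, dedupe via a set) with a back-recursive enumeration of consecutive partitions (last line either starts its own group or merges into the last group), with no set and the blank-group filter as a comprehension over the sorted list.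
import Mathlib
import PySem

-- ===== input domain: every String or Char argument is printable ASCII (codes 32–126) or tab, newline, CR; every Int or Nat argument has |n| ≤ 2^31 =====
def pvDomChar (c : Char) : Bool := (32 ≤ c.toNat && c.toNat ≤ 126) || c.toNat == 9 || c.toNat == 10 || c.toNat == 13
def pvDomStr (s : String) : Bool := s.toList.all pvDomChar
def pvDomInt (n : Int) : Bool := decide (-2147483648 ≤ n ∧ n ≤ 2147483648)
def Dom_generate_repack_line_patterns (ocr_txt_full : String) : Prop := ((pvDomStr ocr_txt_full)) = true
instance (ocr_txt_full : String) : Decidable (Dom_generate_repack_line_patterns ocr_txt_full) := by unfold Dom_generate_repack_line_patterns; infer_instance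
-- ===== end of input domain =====

-- B replaces A's bitmask enumeration of consecutive partitions (with set dedup) by a
-- back-recursion on the split line list; objective: alternative (genuinely different algorithm).

-- ===== PORT A =====
-- inner loop body of generate_repack_elem_patterns: state = (pak_txt_list, start_idx)
def pvStepA (ocr : List String) (sep : String) (pattern : Int) (st : List String × Int) (idx : Int) : List String × Int :=
  if PySem.Int.band pattern ((1:Int) <<< (idx - 1).toNat) = 0 then
    (st.1 ++ [PySem.Str.join sep (PySem.List.slice ocr (some st.2) (some idx))], idx)
  else st

-- body of the 'for pattern in range(...)' loop: one partition for one bit pattern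
def pvBuildA (ocr : List String) (sep : String) (pattern : Int) : List String :=
  let st := (PySem.List.pyRange 1 (PySem.List.len ocr)).foldl (pvStepA ocr sep pattern) ([], 0)
  st.1 ++ [PySem.Str.join sep (PySem.List.slice ocr (some st.2) none)]

def generate_repack_elem_patterns (ocr_txt_list : List String) (sep : String) : List (List String) :=
  let ocr := ocr_txt_list.map (fun s => s)   -- list(map(str, ...)): str on a str is the identity
  if PySem.List.len ocr ≤ 0 then []
  else
    let pset : PySem.Set (List String) :=
      (PySem.List.pyRange 0 ((1:Int) <<< (PySem.List.len ocr - 1).toNat)).foldl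
        (fun pset pattern => pset.add (pvBuildA ocr sep pattern)) PySem.Set.empty
    PySem.List.sorted (pset.map (fun t => t)) (fun x => x) false   -- sorted(map(list, ·)): map(list, ·) is the identity at this type

def generate_repack_line_patterns (ocr_txt_full : String) : List (List String) :=
  let sep := "\n"
  let ocr_txt_list := (PySem.Str.split? ocr_txt_full sep).getD []   -- sep = "\n" ≠ "", so split? is always `some`
  let old_txt_list_list := generate_repack_elem_patterns ocr_txt_list sep
  -- for/else loop: keep old_txt_list unless some group is blank after removing sep
  old_txt_list_list.foldl
    (fun acc p => if p.any (fun t => PySem.Str.replace t sep "" == "") then acc else acc ++ [p]) []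

-- ===== PORT B =====
-- parts(ls): recursion on the last line — it starts its own group or merges into the last group
def pvParts (sep : String) (ls : List String) : List (List String) :=
  if _h : ls.length ≤ 1 then [PySem.List.slice ls none none]
  else
    let rest := pvParts sep (PySem.List.slice ls none (some (-1)))
    (rest.map (fun p => p ++ [PySem.List.pyGetD ls (-1) ""])) ++
    (rest.map (fun p =>
      PySem.List.slice p none (some (-1)) ++
        [PySem.Str.join sep [PySem.List.pyGetD p (-1) "", PySem.List.pyGetD ls (-1) ""]]))
termination_by ls.length
decreasing_by
  simp only [PySem.List.slice_to_neg_one, List.length_dropLast]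
  omega

def generate_repack_line_patterns_alt (ocr_txt_full : String) : List (List String) :=
  let sep := "\n"
  let lines := (PySem.Str.split? ocr_txt_full sep).getD []   -- sep = "\n" ≠ "", so split? is always `some`
  (PySem.List.sorted (pvParts sep lines) (fun x => x) false).filter
    (fun p => p.all (fun g => !(PySem.Str.replace g sep "" == "")))

-- ===== PRECONDITION & SPEC =====
def Spec_generate_repack_line_patterns (ocr_txt_full : String) (out : List (List String)) : Prop := out = generate_repack_line_patterns_alt ocr_txt_full
instance (ocr_txt_full : String) (out : List (List String)) : Decidable (Spec_generate_repack_line_patterns ocr_txt_full out) := by unfold Spec_generate_repack_line_patterns; infer_instance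

-- ===== CLAIM (what is proved, stated in full; the proofs are below) =====
def Claim_equal_generate_repack_line_patterns : Prop := ∀ (ocr_txt_full : String), Dom_generate_repack_line_patterns ocr_txt_full → Spec_generate_repack_line_patterns ocr_txt_full (generate_repack_line_patterns ocr_txt_full)

-- ===== LEMMAS AND PROOFS =====

-- str.split never returns the empty list (Python: ''.split('\n') == [''])
theorem pv_go_ne_nil (sep : List Char) (fuel : Nat) (l cur : List Char) (acc : List (List Char)) :
    PySem.Chars.splitOn.go sep fuel l cur acc ≠ [] := by
  induction fuel generalizing l cur acc with
  | zero => simp [PySem.Chars.splitOn.go]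
  | succ n ih =>
    cases l with
    | nil => simp [PySem.Chars.splitOn.go]
    | cons c rest =>
      rw [PySem.Chars.splitOn.go]
      split
      · exact ih _ _ _
      · exact ih _ _ _

theorem pv_split_ne_nil (s : String) : (PySem.Str.split? s "\n").getD [] ≠ [] := by
  simp [PySem.Str.split?, PySem.Chars.split?, PySem.Chars.splitOn]
  intro h
  exact pv_go_ne_nil _ _ _ _ _ h

-- sep.join(l + [x]) appends sep ++ x when l ≠ []
theorem pv_join_append (sep : List Char) (l : List (List Char)) (x : List Char) (h : l ≠ []) :
    PySem.Chars.join sep (l ++ [x]) = PySem.Chars.join sep l ++ sep ++ x := by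
  induction l with
  | nil => simp at h
  | cons a t ih =>
    cases t with
    | nil => simp [PySem.Chars.join_cons_cons, PySem.Chars.join_singleton]
    | cons b t' =>
      simp only [List.cons_append]
      rw [PySem.Chars.join_cons_cons, PySem.Chars.join_cons_cons]
      have := ih (by simp)
      simp only [List.cons_append] at this
      rw [this]
      simp [List.append_assoc]

theorem pv_str_join_singleton (sep : String) (x : String) : PySem.Str.join sep [x] = x := by
  have h : (PySem.Str.join sep [x]).toList = x.toList := by
    rw [PySem.Str.toList_join]; simp [PySem.Chars.join_singleton]
  have := congrArg String.ofList h
  rwa [String.ofList_toList, String.ofList_toList] at this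

theorem pv_str_join_append (sep : String) (xs : List String) (x : String) (h : xs ≠ []) :
    PySem.Str.join sep (xs ++ [x]) = PySem.Str.join sep [PySem.Str.join sep xs, x] := by
  have h2 : (PySem.Str.join sep (xs ++ [x])).toList = (PySem.Str.join sep [PySem.Str.join sep xs, x]).toList := by
    rw [PySem.Str.toList_join, PySem.Str.toList_join]
    rw [List.map_append, List.map_singleton, pv_join_append _ _ _ (by simpa using h)]
    rw [List.map_cons, List.map_singleton, PySem.Chars.join_cons_cons, PySem.Chars.join_singleton]
    rw [PySem.Str.toList_join]
  have := congrArg String.ofList h2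
  rwa [String.ofList_toList, String.ofList_toList] at this

-- slices entirely inside `front` ignore an appended last element
theorem pv_slice_agree (front : List String) (last : String) (s i : Int)
    (hs : 0 ≤ s) (hsi : s ≤ i) (hi : i ≤ (front.length : Int)) :
    PySem.List.slice (front ++ [last]) (some s) (some i) = PySem.List.slice front (some s) (some i) := by
  rw [PySem.List.slice_toNat _ hs (le_trans hs hsi), PySem.List.slice_toNat _ hs (le_trans hs hsi)]
  rw [List.drop_append_of_le_length (by omega)]
  rw [List.take_append_of_le_length (by simp; omega)]

-- the inner fold over idx ∈ [i, front.length) is the same on front ++ [last] as on front,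
-- and its final start_idx stays in [0, front.length - 1]
theorem pv_agree (front : List String) (last : String) (sep : String) (pattern : Int) :
    ∀ (k i : Nat) (acc : List String) (s : Int), i + k = front.length → 1 ≤ i → 0 ≤ s → s ≤ (i : Int) - 1 →
      ((PySem.List.pyRange (i : Int) (front.length : Int)).foldl (pvStepA (front ++ [last]) sep pattern) (acc, s)
        = (PySem.List.pyRange (i : Int) (front.length : Int)).foldl (pvStepA front sep pattern) (acc, s))
      ∧ 0 ≤ ((PySem.List.pyRange (i : Int) (front.length : Int)).foldl (pvStepA front sep pattern) (acc, s)).2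
      ∧ ((PySem.List.pyRange (i : Int) (front.length : Int)).foldl (pvStepA front sep pattern) (acc, s)).2 ≤ (front.length : Int) - 1 := by
  intro k
  induction k with
  | zero =>
    intro i acc s hik h1 hs hsi
    have : (i : Int) = (front.length : Int) := by omega
    rw [this]
    simp [PySem.List.pyRange]
    omega
  | succ m ih =>
    intro i acc s hik h1 hs hsi
    rw [PySem.List.pyRange_one_cons (by omega : (i:Int) < (front.length : Int))]
    simp only [List.foldl_cons]
    have hcast : (i : Int) + 1 = ((i + 1 : Nat) : Int) := by push_cast; ring
    by_cases hb : PySem.Int.band pattern ((1:Int) <<< ((i : Int) - 1).toNat) = 0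
    · have hstep_full : pvStepA (front ++ [last]) sep pattern (acc, s) (i : Int)
          = (acc ++ [PySem.Str.join sep (PySem.List.slice front (some s) (some (i : Int)))], (i : Int)) := by
        simp only [pvStepA, hb, if_true]
        rw [pv_slice_agree front last s i hs (by omega) (by omega)]
      have hstep_front : pvStepA front sep pattern (acc, s) (i : Int)
          = (acc ++ [PySem.Str.join sep (PySem.List.slice front (some s) (some (i : Int)))], (i : Int)) := by
        simp only [pvStepA, hb, if_true]
      rw [hstep_full, hstep_front, hcast]
      exact ih (i+1) _ _ (by omega) (by omega) (by positivity) (by push_cast; omega)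
    · have hstep_full : pvStepA (front ++ [last]) sep pattern (acc, s) (i : Int) = (acc, s) := by
        simp only [pvStepA, hb, if_false]
      have hstep_front : pvStepA front sep pattern (acc, s) (i : Int) = (acc, s) := by
        simp only [pvStepA, hb, if_false]
      rw [hstep_full, hstep_front, hcast]
      exact ih (i+1) _ _ (by omega) (by omega) hs (by push_cast; omega)

-- bit (front.length - 1) clear: the last line becomes its own group
theorem pv_build_split_zero (front : List String) (last : String) (sep : String) (pattern : Int)
    (hf : front ≠ []) (hbit : PySem.Int.band pattern ((1:Int) <<< (front.length - 1)) = 0) :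
    pvBuildA (front ++ [last]) sep pattern = pvBuildA front sep pattern ++ [last] := by
  have hm : 1 ≤ front.length := List.length_pos_of_ne_nil hf
  obtain ⟨hfold, hge, hle⟩ := pv_agree front last sep pattern (front.length - 1) 1 [] 0 (by omega) le_rfl le_rfl (by norm_num)
  simp only [Nat.cast_one] at hfold hge hle
  set P := (PySem.List.pyRange 1 (front.length : Int)).foldl (pvStepA front sep pattern) ([], 0) with hP
  have hr : PySem.List.pyRange 1 (((front ++ [last]).length : Nat) : Int)
      = PySem.List.pyRange 1 (front.length : Int) ++ [(front.length : Int)] := by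
    simp only [List.length_append, List.length_cons, List.length_nil]
    push_cast
    exact PySem.List.pyRange_one_succ_right (by exact_mod_cast hm)
  have hstep : pvStepA (front ++ [last]) sep pattern P (front.length : Int)
      = (P.1 ++ [PySem.Str.join sep (List.drop P.2.toNat front)], (front.length : Int)) := by
    have hexp : (((front.length : Int) - 1)).toNat = front.length - 1 := by omega
    simp only [pvStepA, hexp, hbit, if_true]
    rw [PySem.List.slice_toNat _ hge (by positivity)]
    rw [List.drop_append_of_le_length (by omega)]
    rw [List.take_append_of_le_length (by simp)]
    rw [List.take_of_length_le (by simp)]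
  simp only [pvBuildA, PySem.List.len_eq]
  rw [hr, List.foldl_append, hfold, ← hP]
  simp only [List.foldl_cons, List.foldl_nil, hstep]
  rw [PySem.List.slice_from _ (by positivity), PySem.List.slice_from _ hge]
  have : (front.length : Int).toNat = front.length := by omega
  rw [this, List.drop_append_of_le_length (le_refl front.length), List.drop_length]
  rw [List.nil_append, pv_str_join_singleton]

-- bit (front.length - 1) set: the last line is merged into the last group
theorem pv_build_split_one (front : List String) (last : String) (sep : String) (pattern : Int)
    (hf : front ≠ []) (hbit : PySem.Int.band pattern ((1:Int) <<< (front.length - 1)) ≠ 0) :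
    pvBuildA (front ++ [last]) sep pattern =
      (pvBuildA front sep pattern).dropLast ++
        [PySem.Str.join sep [PySem.List.pyGetD (pvBuildA front sep pattern) (-1) "", last]] := by
  have hm : 1 ≤ front.length := List.length_pos_of_ne_nil hf
  obtain ⟨hfold, hge, hle⟩ := pv_agree front last sep pattern (front.length - 1) 1 [] 0 (by omega) le_rfl le_rfl (by norm_num)
  simp only [Nat.cast_one] at hfold hge hle
  set P := (PySem.List.pyRange 1 (front.length : Int)).foldl (pvStepA front sep pattern) ([], 0) with hP
  have hr : PySem.List.pyRange 1 (((front ++ [last]).length : Nat) : Int)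
      = PySem.List.pyRange 1 (front.length : Int) ++ [(front.length : Int)] := by
    simp only [List.length_append, List.length_cons, List.length_nil]
    push_cast
    exact PySem.List.pyRange_one_succ_right (by exact_mod_cast hm)
  have hstep : pvStepA (front ++ [last]) sep pattern P (front.length : Int) = P := by
    have hexp : (((front.length : Int) - 1)).toNat = front.length - 1 := by omega
    simp only [pvStepA, hexp, hbit, if_false]
  have hdrop_ne : List.drop P.2.toNat front ≠ [] := by
    intro hcon
    have := List.drop_eq_nil_iff.mp hcon
    omega
  simp only [pvBuildA, PySem.List.len_eq]
  rw [hr, List.foldl_append, hfold, ← hP]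
  simp only [List.foldl_cons, List.foldl_nil, hstep]
  rw [PySem.List.slice_from _ hge, PySem.List.slice_from _ hge]
  rw [List.drop_append_of_le_length (by omega)]
  rw [pv_str_join_append sep _ _ hdrop_ne]
  rw [List.dropLast_concat, PySem.List.pyGetD_neg_one_append_singleton]

theorem pv_bit_low (q n : Nat) (h : q < 2 ^ n) :
    PySem.Int.band (q : Int) ((1:Int) <<< n) = 0 := by
  have h1 : (1:Int) <<< n = ((2 ^ n : Nat) : Int) := by rw [Int.shiftLeft_eq]; push_cast; ring
  rw [h1, PySem.Int.band_natCast, Nat.and_two_pow, Nat.testBit_lt_two_pow h]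
  simp

theorem pv_bit_high (q n : Nat) (h : q < 2 ^ n) :
    PySem.Int.band ((2 ^ n + q : Nat) : Int) ((1:Int) <<< n) ≠ 0 := by
  have h1 : (1:Int) <<< n = ((2 ^ n : Nat) : Int) := by rw [Int.shiftLeft_eq]; push_cast; ring
  rw [h1, PySem.Int.band_natCast, Nat.and_two_pow, Nat.testBit_two_pow_add_eq,
    Nat.testBit_lt_two_pow h]
  simp

theorem pv_bit_lower (q n i : Nat) (h : i < n) :
    PySem.Int.band ((2 ^ n + q : Nat) : Int) ((1:Int) <<< i) = PySem.Int.band (q : Int) ((1:Int) <<< i) := by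
  have h1 : (1:Int) <<< i = ((2 ^ i : Nat) : Int) := by rw [Int.shiftLeft_eq]; push_cast; ring
  rw [h1, PySem.Int.band_natCast, PySem.Int.band_natCast, Nat.and_two_pow, Nat.and_two_pow,
    Nat.testBit_two_pow_add_gt h]

theorem pv_range_shift (d : Nat) (c : Int) :
    PySem.List.pyRange c (c + (d : Int)) = (PySem.List.pyRange 0 (d : Int)).map (fun q => c + q) := by
  induction d generalizing c with
  | zero => simp [PySem.List.pyRange]
  | succ m ih =>
    rw [PySem.List.pyRange_one_cons (by push_cast; omega), PySem.List.pyRange_one_cons (a := 0) (by push_cast; omega)]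
    have e1 : c + ((m + 1 : Nat) : Int) = (c + 1) + (m : Nat) := by push_cast; ring
    have e2 : ((m + 1 : Nat) : Int) = (0 + 1) + (m : Nat) := by push_cast; ring
    rw [e1, e2, ih (c + 1), ih (0 + 1)]
    simp [List.map_map]

-- pvBuildA front only reads the bits 0 .. front.length - 2 of the pattern
theorem pv_bitcong (front : List String) (sep : String) (p p' : Int)
    (h : ∀ i : Nat, i < front.length - 1 → PySem.Int.band p ((1:Int) <<< i) = PySem.Int.band p' ((1:Int) <<< i)) :
    pvBuildA front sep p = pvBuildA front sep p' := by
  simp only [pvBuildA, PySem.List.len_eq]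
  have heq : (PySem.List.pyRange 1 (front.length : Int)).foldl (pvStepA front sep p) ([], 0)
      = (PySem.List.pyRange 1 (front.length : Int)).foldl (pvStepA front sep p') ([], 0) := by
    apply PySem.List.foldl_congr_mem
    intro acc x hx
    obtain ⟨hx1, hx2⟩ := PySem.List.mem_pyRange_one.mp hx
    have hlt : (x - 1).toNat < front.length - 1 := by omega
    simp only [pvStepA, h _ hlt]
  rw [heq]

-- MAIN: the list of partitions built from all bit patterns IS pvParts, in the same order
theorem pv_main (sep : String) (ls : List String) (h : ls ≠ []) :
    (PySem.List.pyRange 0 ((1:Int) <<< (ls.length - 1))).map (fun pattern => pvBuildA ls sep pattern)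
      = pvParts sep ls := by
  induction ls using List.reverseRecOn with
  | nil => exact absurd rfl h
  | append_singleton front last ih =>
    by_cases hf : front = []
    · subst hf
      simp only [List.nil_append, List.length_cons, List.length_nil]
      have h11 : (1:Int) <<< (0 + 1 - 1 : Nat) = 1 := rfl
      rw [h11]
      rw [PySem.List.pyRange_one_cons (by norm_num)]
      have hempty : PySem.List.pyRange (0 + 1) 1 = [] := by simp [PySem.List.pyRange]
      rw [hempty]
      have hbuild : pvBuildA [last] sep 0 = [last] := by
        simp only [pvBuildA, PySem.List.len_eq, List.length_cons, List.length_nil]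
        have : PySem.List.pyRange 1 ((1:Nat) : Int) = [] := by simp [PySem.List.pyRange]
        rw [this]
        simp only [List.foldl_nil]
        rw [PySem.List.slice_from _ (by norm_num)]
        simp [pv_str_join_singleton]
      rw [pvParts]
      simp [hbuild, PySem.List.slice_none_none]
    · have hm : 1 ≤ front.length := List.length_pos_of_ne_nil hf
      have hlen : (front ++ [last]).length = front.length + 1 := by simp
      set c : Int := ((2 ^ (front.length - 1) : Nat) : Int) with hc
      have hc0 : 0 ≤ c := by positivity
      have hnat : (2 ^ front.length : Nat) = 2 ^ (front.length - 1) + 2 ^ (front.length - 1) := by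
        have he : front.length - 1 + 1 = front.length := by omega
        calc (2 ^ front.length : Nat) = 2 ^ (front.length - 1 + 1) := by rw [he]
          _ = 2 ^ (front.length - 1) + 2 ^ (front.length - 1) := Nat.two_pow_succ _
      have hmask : (1:Int) <<< ((front ++ [last]).length - 1) = c + c := by
        rw [hlen, Int.shiftLeft_eq, one_mul]
        simp only [Nat.add_sub_cancel, hc]
        rw [show ((2:Int) ^ front.length) = (((2 ^ front.length : Nat) : Nat) : Int) from by push_cast; ring]
        rw [hnat]
        push_cast
        ring
      have hshift : (1:Int) <<< (front.length - 1) = c := by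
        rw [Int.shiftLeft_eq, one_mul, hc]
        push_cast
        ring
      rw [hmask]
      have hsplit : PySem.List.pyRange 0 (c + c)
          = PySem.List.pyRange 0 c ++ (PySem.List.pyRange 0 c).map (fun q => c + q) := by
        rw [PySem.List.pyRange_one_append 0 c (c + c) hc0 (by omega)]
        rw [show (c + c) = c + ((2 ^ (front.length - 1) : Nat) : Int) from rfl]
        rw [pv_range_shift]
      rw [hsplit, List.map_append, List.map_map]
      have ihf := ih hf
      rw [hshift] at ihf
      have hfirst : (PySem.List.pyRange 0 c).map (fun pattern => pvBuildA (front ++ [last]) sep pattern)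
          = (pvParts sep front).map (fun p => p ++ [last]) := by
        rw [← ihf, List.map_map]
        apply List.map_congr_left
        intro q hq
        obtain ⟨hq0, hq1⟩ := PySem.List.mem_pyRange_one.mp hq
        have hq1' : q < ((2 ^ (front.length - 1) : Nat) : Int) := by rw [← hc]; exact hq1
        have hqn : q = ((q.toNat : Nat) : Int) := by omega
        have hqlt : q.toNat < 2 ^ (front.length - 1) := by omega
        simp only [Function.comp_apply]
        rw [hqn]
        exact pv_build_split_zero front last sep _ hf (pv_bit_low _ _ hqlt)
      have hsecond : (PySem.List.pyRange 0 c).map ((fun pattern => pvBuildA (front ++ [last]) sep pattern) ∘ (fun q => c + q))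
          = (pvParts sep front).map (fun p =>
              p.dropLast ++ [PySem.Str.join sep [PySem.List.pyGetD p (-1) "", last]]) := by
        rw [← ihf, List.map_map]
        apply List.map_congr_left
        intro q hq
        obtain ⟨hq0, hq1⟩ := PySem.List.mem_pyRange_one.mp hq
        have hq1' : q < ((2 ^ (front.length - 1) : Nat) : Int) := by rw [← hc]; exact hq1
        have hqlt : q.toNat < 2 ^ (front.length - 1) := by omega
        have hcq : c + q = (((2 ^ (front.length - 1) + q.toNat : Nat) : Nat) : Int) := by
          rw [hc]; push_cast; omega
        simp only [Function.comp_apply]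
        rw [hcq]
        rw [pv_build_split_one front last sep _ hf (pv_bit_high _ _ hqlt)]
        have hcong : pvBuildA front sep (((2 ^ (front.length - 1) + q.toNat : Nat) : Nat) : Int)
            = pvBuildA front sep ((q.toNat : Nat) : Int) := by
          apply pv_bitcong
          intro i hi
          exact pv_bit_lower q.toNat (front.length - 1) i hi
        rw [hcong, show ((q.toNat : Nat) : Int) = q from by omega]
      rw [hfirst, hsecond]
      conv_rhs => rw [pvParts]
      rw [dif_neg (by simpa using hf)]
      simp only [PySem.List.slice_to_neg_one, List.dropLast_concat,
        PySem.List.pyGetD_neg_one_append_singleton]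

theorem pv_parts_ne_nil (sep : String) (ls : List String) (h : ls ≠ []) :
    ∀ p ∈ pvParts sep ls, p ≠ [] := by
  induction ls using List.reverseRecOn with
  | nil => exact absurd rfl h
  | append_singleton front last ih =>
    by_cases hf : front = []
    · subst hf
      rw [pvParts]
      simp [PySem.List.slice_none_none]
    · intro p hp
      rw [pvParts, dif_neg (by simpa using hf)] at hp
      simp only [List.mem_append, List.mem_map] at hp
      rcases hp with ⟨q, _, hq⟩ | ⟨q, _, hq⟩ <;> subst hq <;> simp

-- strings: read off and cancel the components of sep.join([x, y])
theorem pv_join_two_toList (sep x y : String) :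
    (PySem.Str.join sep [x, y]).toList = x.toList ++ sep.toList ++ y.toList := by
  rw [PySem.Str.toList_join]
  simp only [List.map_cons, List.map_nil]
  rw [PySem.Chars.join_cons_cons, PySem.Chars.join_singleton]

theorem pv_join_two_inj (sep x x' y : String) (h : PySem.Str.join sep [x, y] = PySem.Str.join sep [x', y]) :
    x = x' := by
  have h2 := congrArg String.toList h
  rw [pv_join_two_toList, pv_join_two_toList] at h2
  have h3 := List.append_cancel_right (List.append_cancel_right h2)
  have := congrArg String.ofList h3
  rwa [String.ofList_toList, String.ofList_toList] at this

theorem pv_join_two_ne (sep x y : String) (hsep : sep.toList ≠ []) :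
    PySem.Str.join sep [x, y] ≠ y := by
  intro h
  have h2 := congrArg String.toList h
  rw [pv_join_two_toList] at h2
  have := congrArg List.length h2
  simp only [List.length_append] at this
  have : sep.toList.length = 0 := by omega
  exact hsep (List.length_eq_zero_iff.mp this)

-- distinct bit patterns give distinct partitions
theorem pv_parts_nodup (sep : String) (ls : List String) (h : ls ≠ []) (hsep : sep.toList ≠ []) :
    (pvParts sep ls).Nodup := by
  induction ls using List.reverseRecOn with
  | nil => exact absurd rfl h
  | append_singleton front last ih =>
    by_cases hf : front = []
    · subst hf
      rw [pvParts]
      simp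
    · have hne := pv_parts_ne_nil sep front hf
      have hnd := ih hf
      rw [pvParts, dif_neg (by simpa using hf)]
      simp only [PySem.List.slice_to_neg_one, List.dropLast_concat,
        PySem.List.pyGetD_neg_one_append_singleton]
      apply List.Nodup.append
      · exact hnd.map (fun p q hpq => List.append_singleton_inj.mp hpq |>.1)
      · apply List.Nodup.map_on _ hnd
        intro p hp q hq hpq
        obtain ⟨h1, h2⟩ := List.append_singleton_inj.mp hpq
        rw [PySem.List.pyGetD_neg_one _ _ (hne p hp), PySem.List.pyGetD_neg_one _ _ (hne q hq)] at h2
        have h3 := pv_join_two_inj sep _ _ _ h2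
        calc p = p.dropLast ++ [p.getLast (hne p hp)] := (List.dropLast_concat_getLast _).symm
          _ = q.dropLast ++ [q.getLast (hne q hq)] := by rw [h1, h3]
          _ = q := List.dropLast_concat_getLast _
      · intro p hp hp2
        simp only [List.mem_map] at hp hp2
        obtain ⟨q, hq, rfl⟩ := hp
        obtain ⟨q', hq', he⟩ := hp2
        obtain ⟨-, h2⟩ := List.append_singleton_inj.mp he
        exact pv_join_two_ne sep _ last hsep h2

-- A's for/else filter loop is a List.filter with B's all(...) predicate
theorem pv_filter_fold (zs : List (List String)) (f : String → Bool) :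
    zs.foldl (fun acc p => if p.any f then acc else acc ++ [p]) []
      = zs.filter (fun p => p.all (fun g => !(f g))) := by
  have h1 : zs.foldl (fun acc p => if p.any f then acc else acc ++ [p]) []
      = zs.foldl (fun acc p => if (p.all fun g => !(f g)) = true then acc ++ [p] else acc) [] := by
    apply PySem.List.foldl_congr_mem
    intro acc x _
    rcases hx : x.any f
    · simp [List.all_eq_not_any_not, hx]
    · simp [List.all_eq_not_any_not, hx]
  rw [h1]
  have h2 := PySem.List.foldl_append_if (fun p : List String => p.all fun g => !(f g)) (fun p => p) zs []
  simpa using h2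

theorem pv_final (s : String) : generate_repack_line_patterns s = generate_repack_line_patterns_alt s := by
  have hl : (PySem.Str.split? s "\n").getD [] ≠ [] := pv_split_ne_nil s
  set lines : List String := (PySem.Str.split? s "\n").getD [] with hlines
  have hm : 1 ≤ lines.length := List.length_pos_of_ne_nil hl
  have helem : generate_repack_elem_patterns lines "\n"
      = PySem.List.sorted (pvParts "\n" lines) (fun x => x) false := by
    simp only [generate_repack_elem_patterns, List.map_id']
    rw [if_neg (by rw [PySem.List.len_eq]; omega)]
    rw [← PySem.Set.update_map_eq_foldl_add]
    rw [show (PySem.Set.empty : PySem.Set (List String)) = [] from rfl, PySem.Set.update_nil_left]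
    have hexp : (PySem.List.len lines - 1).toNat = lines.length - 1 := by
      rw [PySem.List.len_eq]; omega
    rw [hexp, pv_main "\n" lines hl]
    rw [PySem.Set.ofList_eq_self_of_nodup _ (pv_parts_nodup "\n" lines hl (by decide))]
  simp only [generate_repack_line_patterns, generate_repack_line_patterns_alt, ← hlines, helem]
  rw [pv_filter_fold]

-- ===== VERDICT (by name: the statement is the Claim_ definition above) =====
theorem generate_repack_line_patterns_spec : Claim_equal_generate_repack_line_patterns := by
  intro s _
  unfold Spec_generate_repack_line_patterns
  exact pv_final s
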